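-- pv_equiv track=rewrite | github.com/acapbumble/Data-Structure-Algorithm-2 | measure_performance.py | distribute_power_plant_load_mod
-- ===== SOURCE A (Python) =====
-- def distribute_power_plant_load_mod(power_plants, loads):
--     n = len(power_plants)
--     m = len(loads)
--     power_plants = sorted(power_plants)
--     dp = [0 for j in range(m + 1)]
--
--     for i in range(1, n + 1):
--         for j in range(m, 0, -1):
--             if loads[j - 1] <= power_plants[i - 1]:
--                 dp[j] = max(dp[j], dp[j - 1] + loads[j - 1])
--
--     return dp[m]
-- ===== SOURCE B (Python) =====
-- def distribute_power_plant_load_mod(power_plants, loads):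
--     # The DP's answer is the best sum over feasible contiguous suffixes of loads:
--     # a suffix of length t is feasible iff, walking from the right, each of its
--     # loads fits under the corresponding largest-remaining plant. One scan.
--     ps = sorted(power_plants)
--     best = 0
--     s = 0
--     for load, plant in zip(reversed(loads), reversed(ps)):
--         if load > plant:
--             break
--         s += load
--         if s > best:
--             best = s
--     return best
-- ===== Notes on version B (the rewrite author's own statement) =====
-- stated objective: faster
-- what changed: Replaced the O(n*m) knapsack-style DP table with a single right-to-left greedy scan: the DP value equals the best sum over feasible contiguous suffixes of loads, where feasibility is checked by pairing loads from the right with the largest remaining sorted plants.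
import Mathlib
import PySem

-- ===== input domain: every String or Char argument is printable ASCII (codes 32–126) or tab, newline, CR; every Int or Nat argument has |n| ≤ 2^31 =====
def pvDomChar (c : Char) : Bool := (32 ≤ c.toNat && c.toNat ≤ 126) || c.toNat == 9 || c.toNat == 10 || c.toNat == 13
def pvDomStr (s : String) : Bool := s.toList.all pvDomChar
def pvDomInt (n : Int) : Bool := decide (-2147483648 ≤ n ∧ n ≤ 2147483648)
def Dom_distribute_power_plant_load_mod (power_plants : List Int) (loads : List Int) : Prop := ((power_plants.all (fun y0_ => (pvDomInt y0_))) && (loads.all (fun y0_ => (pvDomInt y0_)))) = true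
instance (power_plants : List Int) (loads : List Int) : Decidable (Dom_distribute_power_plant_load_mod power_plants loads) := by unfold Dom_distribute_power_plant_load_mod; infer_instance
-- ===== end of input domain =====

-- B replaces A's O(n*m) DP table by one right-to-left greedy scan over the loads
-- paired with the largest sorted plants.

-- ===== PORT A =====
def distribute_power_plant_load_mod (power_plants : List Int) (loads : List Int) : Int :=
  let n := power_plants.length
  let m := loads.length
  let power_plants := PySem.List.sorted power_plants (fun x => x) false
  let dp : List Int := (PySem.List.pyRange 0 ((m : Int) + 1) 1).map (fun _ => (0 : Int))
  let dp := (PySem.List.pyRange 1 ((n : Int) + 1) 1).foldl (fun dp i =>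
    (PySem.List.pyRange (m : Int) 0 (-1)).foldl (fun dp j =>
      if PySem.List.pyGetD loads (j - 1) 0 ≤ PySem.List.pyGetD power_plants (i - 1) 0 then
        PySem.List.pySetD dp j (max (PySem.List.pyGetD dp j 0)
          (PySem.List.pyGetD dp (j - 1) 0 + PySem.List.pyGetD loads (j - 1) 0))
      else dp) dp) dp
  PySem.List.pyGetD dp (m : Int) 0

-- ===== PORT B =====
-- the for-loop over zip(reversed(loads), reversed(ps)) with break, as recursion
def pvAltLoop : List (Int × Int) → Int → Int → Int
  | [], _, best => best
  | (load, plant) :: rest, s, best =>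
      if plant < load then best
      else
        let s' := s + load
        pvAltLoop rest s' (if best < s' then s' else best)

def distribute_power_plant_load_mod_alt (power_plants : List Int) (loads : List Int) : Int :=
  let ps := PySem.List.sorted power_plants (fun x => x) false
  pvAltLoop (loads.reverse.zip ps.reverse) 0 0

-- ===== PRECONDITION & SPEC =====
def Spec_distribute_power_plant_load_mod (power_plants : List Int) (loads : List Int) (out : Int) : Prop := out = distribute_power_plant_load_mod_alt power_plants loads
instance (power_plants : List Int) (loads : List Int) (out : Int) : Decidable (Spec_distribute_power_plant_load_mod power_plants loads out) := by unfold Spec_distribute_power_plant_load_mod; infer_instance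

-- ===== CLAIM (what is proved, stated in full; the proofs are below) =====
def Claim_equal_distribute_power_plant_load_mod : Prop := ∀ (power_plants : List Int) (loads : List Int), Dom_distribute_power_plant_load_mod power_plants loads → Spec_distribute_power_plant_load_mod power_plants loads (distribute_power_plant_load_mod power_plants loads)

-- ===== LEMMAS AND PROOFS =====

-- gval P L: with P the plants in descending order and L the loads reversed, the
-- common value of both programs: the best running prefix sum of L over prefixes
-- matched pointwise under P (and 0 for the empty prefix).
def gval : List Int → List Int → Int
  | [], _ => 0
  | _ :: _, [] => 0
  | p :: P, l :: L => if l ≤ p then max 0 (l + gval P L) else 0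

lemma gval_nonneg (P L : List Int) : 0 ≤ gval P L := by
  cases P with
  | nil => simp [gval]
  | cons p P =>
    cases L with
    | nil => simp [gval]
    | cons l L => simp only [gval]; split <;> simp

lemma gval_nil_right (P : List Int) : gval P [] = 0 := by
  cases P <;> simp [gval]

-- the two monotonicity facts, by one induction on P
lemma gval_mono_grow (P : List Int) (hP : P.Pairwise (· ≥ ·)) :
    (∀ l L, gval P (l :: L) ≤ max 0 (l + gval P L)) ∧
    (∀ q, (∀ x ∈ P, x ≤ q) → ∀ L, gval P L ≤ gval (q :: P) L) := by
  induction P with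
  | nil =>
    constructor
    · intro l L; simp [gval]
    · intro q _ L
      cases L with
      | nil => simp [gval]
      | cons l L => simp only [gval]
                    split <;> simp
  | cons p P ih =>
    have hP' : P.Pairwise (· ≥ ·) := (List.pairwise_cons.mp hP).2
    have hple : ∀ x ∈ P, x ≤ p := by
      intro x hx; exact (List.pairwise_cons.mp hP).1 x hx
    obtain ⟨ihmono, ihgrow⟩ := ih hP'
    have mono : ∀ l L, gval (p :: P) (l :: L) ≤ max 0 (l + gval (p :: P) L) := by
      intro l L
      by_cases h : l ≤ p
      · have hg := ihgrow p hple L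
        have := gval_nonneg P L
        simp only [gval, if_pos h]
        omega
      · simp only [gval, if_neg h]
        have := gval_nonneg (p :: P) L
        omega
    refine ⟨mono, ?_⟩
    intro q hq L
    cases L with
    | nil => simp [gval_nil_right]
    | cons l L =>
      by_cases h : l ≤ q
      · have hm := mono l L
        have hrw : gval (q :: p :: P) (l :: L) = max 0 (l + gval (p :: P) L) := by
          simp only [gval, if_pos h]
        rw [hrw]; exact hm
      · have hpq : p ≤ q := hq p (by simp)
        have hlp : ¬ l ≤ p := by omega
        simp only [gval, if_neg h, if_neg hlp]
        exact le_refl 0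

-- key step: prepending a new largest plant
lemma gval_step (P : List Int) (p : Int) (hP : P.Pairwise (· ≥ ·)) (hp : ∀ x ∈ P, x ≤ p)
    (l : Int) (L : List Int) :
    gval (p :: P) (l :: L) =
      if l ≤ p then max (gval P (l :: L)) (gval P L + l) else gval P (l :: L) := by
  obtain ⟨mono, _⟩ := gval_mono_grow P hP
  by_cases h : l ≤ p
  · have h1 := mono l L
    have h2 := gval_nonneg P (l :: L)
    have h3 := gval_nonneg P L
    rw [if_pos h]
    have hlhs : gval (p :: P) (l :: L) = max 0 (l + gval P L) := by
      simp only [gval, if_pos h]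
    rw [hlhs]
    omega
  · rw [if_neg h]
    have hlhs : gval (p :: P) (l :: L) = 0 := by
      simp only [gval, if_neg h]
    rw [hlhs]
    cases P with
    | nil => simp [gval]
    | cons q Q =>
      have hqp : q ≤ p := hp q (by simp)
      have : ¬ l ≤ q := by omega
      simp [gval, this]

-- inner loop (one plant pass) invariant: before folding over [k, …, 1] the
-- entries ≤ k hold the previous row, the entries > k the new row; afterwards
-- every entry holds the new row.
lemma pass_lemma (loads P : List Int) (p : Int)
    (hP : P.Pairwise (· ≥ ·)) (hp : ∀ x ∈ P, x ≤ p)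
    (k : Nat) (hk : k ≤ loads.length) (e : List Int)
    (hlen : e.length = loads.length + 1)
    (h1 : ∀ j : Nat, j ≤ k → e.getD j 0 = gval P ((loads.take j).reverse))
    (h2 : ∀ j : Nat, k < j → j ≤ loads.length →
        e.getD j 0 = gval (p :: P) ((loads.take j).reverse)) :
    ((PySem.List.pyRange (k : Int) 0 (-1)).foldl (fun dp j =>
      if PySem.List.pyGetD loads (j - 1) 0 ≤ p then
        PySem.List.pySetD dp j (max (PySem.List.pyGetD dp j 0)
          (PySem.List.pyGetD dp (j - 1) 0 + PySem.List.pyGetD loads (j - 1) 0))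
      else dp) e).length = loads.length + 1 ∧
    ∀ j : Nat, j ≤ loads.length →
      ((PySem.List.pyRange (k : Int) 0 (-1)).foldl (fun dp j =>
        if PySem.List.pyGetD loads (j - 1) 0 ≤ p then
          PySem.List.pySetD dp j (max (PySem.List.pyGetD dp j 0)
            (PySem.List.pyGetD dp (j - 1) 0 + PySem.List.pyGetD loads (j - 1) 0))
        else dp) e).getD j 0 = gval (p :: P) ((loads.take j).reverse) := by
  induction k generalizing e with
  | zero =>
    rw [show ((0 : Nat) : Int) = (0 : Int) from rfl,
      PySem.List.pyRange_neg_one_eq_nil (le_refl 0)]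
    simp only [List.foldl_nil]
    refine ⟨hlen, ?_⟩
    intro j hj
    rcases Nat.eq_zero_or_pos j with h0 | hpos
    · subst h0
      rw [h1 0 (Nat.le_refl 0)]
      simp [gval_nil_right]
    · exact h2 j hpos hj
  | succ k ih =>
    have hkl : k < loads.length := hk
    have hpos : (0 : Int) < ((k + 1 : Nat) : Int) := by exact_mod_cast Nat.succ_pos k
    have hcast : ((k + 1 : Nat) : Int) - 1 = (k : Int) := by push_cast; ring
    have hget : PySem.List.pyGetD loads ((k : Nat) : Int) 0 = loads[k] := by
      rw [PySem.List.pyGetD_natCast]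
      simp [List.getD_eq_getElem?_getD, List.getElem?_eq_getElem hkl]
    have htake : (loads.take (k + 1)).reverse = loads[k] :: (loads.take k).reverse := by
      rw [List.take_add_one, List.getElem?_eq_getElem hkl]
      simp
    rw [PySem.List.pyRange_neg_one_cons hpos, List.foldl_cons, hcast]
    simp only [hget, PySem.List.pySetD_natCast, PySem.List.pyGetD_natCast]
    by_cases c : loads[k] ≤ p
    · rw [if_pos c]
      apply ih (Nat.le_of_lt hkl)
      · simp [hlen]
      · intro j hj
        have hne : (k + 1 : Nat) ≠ j := by omega
        rw [List.getD_eq_getElem?_getD, List.getElem?_set_ne hne,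
          ← List.getD_eq_getElem?_getD]
        exact h1 j (Nat.le_succ_of_le hj)
      · intro j hjk hjm
        rcases Nat.lt_or_ge (k + 1) j with hgt | hle
        · have hne : (k + 1 : Nat) ≠ j := by omega
          rw [List.getD_eq_getElem?_getD, List.getElem?_set_ne hne,
            ← List.getD_eq_getElem?_getD]
          exact h2 j hgt hjm
        · have hj1 : j = k + 1 := by omega
          subst hj1
          have hin : k + 1 < e.length := by omega
          rw [List.getD_eq_getElem?_getD, List.getElem?_set_self hin]
          simp only [Option.getD_some]
          rw [h1 (k + 1) (Nat.le_refl _), h1 k (Nat.le_succ_of_le (Nat.le_refl _))]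
          rw [htake, gval_step P p hP hp, if_pos c, ← htake]
    · rw [if_neg c]
      apply ih (Nat.le_of_lt hkl) e hlen
      · intro j hj
        exact h1 j (Nat.le_succ_of_le hj)
      · intro j hjk hjm
        rcases Nat.lt_or_ge (k + 1) j with hgt | hle
        · exact h2 j hgt hjm
        · have hj1 : j = k + 1 := by omega
          subst hj1
          rw [h1 (k + 1) (Nat.le_refl _)]
          rw [htake, gval_step P p hP hp, if_neg c, ← htake]

-- outer loop invariant: after the first i plants the row is gval of the i
-- largest-so-far plants (the reversed sorted prefix)
lemma outer_lemma (pp loads : List Int) (hsort : pp.Pairwise (· ≤ ·))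
    (i : Nat) (hi : i ≤ pp.length) :
    ((PySem.List.pyRange 1 ((i : Int) + 1) 1).foldl (fun dp ii =>
      (PySem.List.pyRange (loads.length : Int) 0 (-1)).foldl (fun dp j =>
        if PySem.List.pyGetD loads (j - 1) 0 ≤ PySem.List.pyGetD pp (ii - 1) 0 then
          PySem.List.pySetD dp j (max (PySem.List.pyGetD dp j 0)
            (PySem.List.pyGetD dp (j - 1) 0 + PySem.List.pyGetD loads (j - 1) 0))
        else dp) dp)
      ((PySem.List.pyRange 0 ((loads.length : Int) + 1) 1).map (fun _ => (0 : Int)))).length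
      = loads.length + 1 ∧
    ∀ j : Nat, j ≤ loads.length →
      ((PySem.List.pyRange 1 ((i : Int) + 1) 1).foldl (fun dp ii =>
        (PySem.List.pyRange (loads.length : Int) 0 (-1)).foldl (fun dp j =>
          if PySem.List.pyGetD loads (j - 1) 0 ≤ PySem.List.pyGetD pp (ii - 1) 0 then
            PySem.List.pySetD dp j (max (PySem.List.pyGetD dp j 0)
              (PySem.List.pyGetD dp (j - 1) 0 + PySem.List.pyGetD loads (j - 1) 0))
          else dp) dp)
        ((PySem.List.pyRange 0 ((loads.length : Int) + 1) 1).map (fun _ => (0 : Int)))).getD j 0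
        = gval ((pp.take i).reverse) ((loads.take j).reverse) := by
  induction i with
  | zero =>
    rw [show ((0 : Nat) : Int) + 1 = (1 : Int) by norm_num,
      PySem.List.pyRange_one_eq_nil (le_refl 1), List.foldl_nil]
    have hdp : ((PySem.List.pyRange 0 ((loads.length : Int) + 1) 1).map (fun _ => (0 : Int)))
        = List.replicate (loads.length + 1) 0 := by
      rw [List.map_const']
      congr 1
      rw [PySem.List.length_pyRange_one]
      omega
    rw [hdp]
    constructor
    · simp
    · intro j hj
      rw [List.getD_eq_getElem?_getD, List.getElem?_replicate]
      simp only [List.take_zero, List.reverse_nil]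
      split <;> simp [gval]
  | succ i ihh =>
    have hi' : i < pp.length := hi
    have hcast : ((i + 1 : Nat) : Int) + 1 = ((i : Int) + 1) + 1 := by push_cast; ring
    rw [hcast, PySem.List.pyRange_one_succ_right (by omega : (1 : Int) ≤ (i : Int) + 1),
      List.foldl_append, List.foldl_cons, List.foldl_nil]
    obtain ⟨ihlen, ihval⟩ := ihh (Nat.le_of_lt hi')
    have hplant : PySem.List.pyGetD pp (((i : Int) + 1) - 1) 0 = pp[i] := by
      rw [show ((i : Int) + 1) - 1 = ((i : Nat) : Int) by ring, PySem.List.pyGetD_natCast]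
      simp [List.getD_eq_getElem?_getD, List.getElem?_eq_getElem hi']
    simp only [hplant]
    have hPp : ((pp.take i).reverse).Pairwise (· ≥ ·) := by
      rw [List.pairwise_reverse]
      exact List.Pairwise.sublist (List.take_sublist i pp) hsort
    have hple : ∀ x ∈ (pp.take i).reverse, x ≤ pp[i] := by
      intro x hx
      rw [List.mem_reverse] at hx
      obtain ⟨a, ha, hax⟩ := List.getElem_of_mem hx
      have hlt : a < i := by
        have := ha; simp only [List.length_take] at this; omega
      have happ : a < pp.length := by omega
      have : (pp.take i)[a] = pp[a] := List.getElem_take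
      rw [this] at hax
      rw [← hax]
      exact List.pairwise_iff_getElem.mp hsort a i happ hi' hlt
    have htake2 : (pp.take (i + 1)).reverse = pp[i] :: (pp.take i).reverse := by
      rw [List.take_add_one, List.getElem?_eq_getElem hi']
      simp
    obtain ⟨plen, pval⟩ := pass_lemma loads ((pp.take i).reverse) (pp[i]) hPp hple
      loads.length (Nat.le_refl _) _ ihlen (fun j hj => ihval j hj)
      (fun j hjk hjm => absurd hjk (by omega))
    refine ⟨plen, ?_⟩
    intro j hj
    rw [htake2]
    exact pval j hj

-- B's loop computes gval
lemma altLoop_eq (L P : List Int) (s best : Int) (hb : s ≤ best) :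
    pvAltLoop (L.zip P) s best = max best (s + gval P L) := by
  induction L generalizing P s best with
  | nil => simp [pvAltLoop, gval_nil_right]; omega
  | cons l L ih =>
    cases P with
    | nil => simp [pvAltLoop, gval]; omega
    | cons p P =>
      by_cases h : p < l
      · have hlp : ¬ l ≤ p := by omega
        simp only [List.zip_cons_cons, pvAltLoop, if_pos h, gval, if_neg hlp]
        omega
      · have hlp : l ≤ p := by omega
        simp only [List.zip_cons_cons, pvAltLoop, if_neg h]
        rw [ih P (s + l) (if best < s + l then s + l else best) (by split <;> omega)]
        have := gval_nonneg P L
        simp only [gval, if_pos hlp]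
        split <;> omega

-- port A computes gval of the whole reversed sorted plants / reversed loads
lemma portA_eq (power_plants loads : List Int) :
    distribute_power_plant_load_mod power_plants loads
      = gval ((PySem.List.sorted power_plants (fun x => x) false).reverse) loads.reverse := by
  unfold distribute_power_plant_load_mod
  simp only []
  rw [show power_plants.length = (PySem.List.sorted power_plants (fun x => x) false).length
    from (PySem.List.length_sorted ..).symm]
  obtain ⟨hlen, hval⟩ := outer_lemma (PySem.List.sorted power_plants (fun x => x) false) loads
    (PySem.List.sorted_pairwise ..) (PySem.List.sorted power_plants (fun x => x) false).length
    (Nat.le_refl _)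
  rw [PySem.List.pyGetD_natCast, hval loads.length (Nat.le_refl _), List.take_length,
    List.take_length]

lemma portB_eq (power_plants loads : List Int) :
    distribute_power_plant_load_mod_alt power_plants loads
      = gval ((PySem.List.sorted power_plants (fun x => x) false).reverse) loads.reverse := by
  unfold distribute_power_plant_load_mod_alt
  simp only []
  rw [altLoop_eq loads.reverse ((PySem.List.sorted power_plants (fun x => x) false).reverse)
    0 0 (le_refl 0)]
  have := gval_nonneg ((PySem.List.sorted power_plants (fun x => x) false).reverse) loads.reverse
  omega

-- ===== VERDICT (by name: the statement is the Claim_ definition above) =====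
theorem distribute_power_plant_load_mod_spec : Claim_equal_distribute_power_plant_load_mod := by
  intro power_plants loads _
  unfold Spec_distribute_power_plant_load_mod
  rw [portA_eq, portB_eq]
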